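-- pv_equiv track=rewrite | github.com/JyotiSuman09/Big-Python | 20_Day_Python_package_manager/exercise.py | create_frequency_table
-- ===== SOURCE A (Python) =====
-- def create_frequency_table(data, key1, key2):
--     frequency_table = {}
--     for cat in data:
--         value1 = cat.get(key1)
--         value2 = cat.get(key2)
--         if value1 and value2:
--             if value1 not in frequency_table:
--                 frequency_table[value1] = {}
--             if value2 not in frequency_table[value1]:
--                 frequency_table[value1][value2] = 0
--             frequency_table[value1][value2] += 1
--     return frequency_table
-- ===== SOURCE B (Python) =====
-- def create_frequency_table(data, key1, key2):
--     # pass 1: collect the (value1, value2) pairs that survive the truthiness filter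
--     pairs = []
--     for cat in data:
--         value1 = cat.get(key1)
--         value2 = cat.get(key2)
--         if value1 and value2:
--             pairs.append((value1, value2))
--     # pass 2: flat counter keyed by the pair
--     counts = {}
--     for p in pairs:
--         counts[p] = counts.get(p, 0) + 1
--     # pass 3: reshape the flat table into the nested dict
--     result = {}
--     for (v1, v2), n in counts.items():
--         if v1 not in result:
--             result[v1] = {}
--         result[v1][v2] = n
--     return result
-- ===== Notes on version B (the rewrite author's own statement) =====
-- stated objective: alternative
-- what changed: A builds the nested dict in one loop with in-place setdefault/increment; B makes three flat passes: filter rows to (value1, value2) pairs, count the pairs in a flat tuple-keyed dict, then reshape that counter into the nested dict.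
import Mathlib
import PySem

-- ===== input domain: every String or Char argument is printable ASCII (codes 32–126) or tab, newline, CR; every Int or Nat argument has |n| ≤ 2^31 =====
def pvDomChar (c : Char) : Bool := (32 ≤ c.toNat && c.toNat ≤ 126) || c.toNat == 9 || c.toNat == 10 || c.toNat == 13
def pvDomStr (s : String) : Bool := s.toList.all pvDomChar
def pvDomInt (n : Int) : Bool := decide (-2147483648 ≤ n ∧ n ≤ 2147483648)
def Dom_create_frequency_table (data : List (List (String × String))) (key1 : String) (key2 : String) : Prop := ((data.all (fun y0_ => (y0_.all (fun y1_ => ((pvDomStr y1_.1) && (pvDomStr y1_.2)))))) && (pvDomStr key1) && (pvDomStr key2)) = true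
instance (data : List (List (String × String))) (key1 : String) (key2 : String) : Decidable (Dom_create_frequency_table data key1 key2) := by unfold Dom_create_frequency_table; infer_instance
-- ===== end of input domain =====

-- B replaces A's single nested-build loop by three flat passes (filter to pairs, flat pair-keyed counter, reshape
-- into the nested dict); same cost, different decomposition ('alternative').

-- ===== PORT A =====
-- A: one loop over data, building the nested dict in place (setdefault-style ifs, then += 1).
def create_frequency_table (data : List (List (String × String))) (key1 : String) (key2 : String) : List (String × List (String × Int)) :=
  let ft : PySem.Dict String (PySem.Dict String Int) :=
    data.foldl (fun ft cat =>
      match (PySem.Dict.mk cat).get? key1, (PySem.Dict.mk cat).get? key2 with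
      | some v1, some v2 =>
        if v1 ≠ "" ∧ v2 ≠ "" then      -- Python truthiness of the two strings
          let ft1 := if ft.contains v1 then ft else ft.insert v1 PySem.Dict.empty
          let inner := ft1.getD v1 PySem.Dict.empty
          let inner1 := if inner.contains v2 then inner else inner.insert v2 (0 : Int)
          ft1.insert v1 (inner1.insert v2 (inner1.getD v2 0 + 1))
        else ft
      | _, _ => ft) PySem.Dict.empty
  ft.items.map (fun p => (p.1, p.2.items))

-- ===== PORT B =====
-- B: pass 1 collects the surviving (v1, v2) pairs; pass 2 counts them in a flat pair-keyed dict;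
-- pass 3 reshapes the flat counter into the nested dict.
def create_frequency_table_alt (data : List (List (String × String))) (key1 : String) (key2 : String) : List (String × List (String × Int)) :=
  let pairs : List (String × String) :=
    data.foldl (fun ps cat =>
      match (PySem.Dict.mk cat).get? key1 with
      | none => ps
      | some v1 =>
        match (PySem.Dict.mk cat).get? key2 with
        | none => ps
        | some v2 => if v1 ≠ "" ∧ v2 ≠ "" then ps ++ [(v1, v2)] else ps) []
  let counts : PySem.Dict (String × String) Int :=
    pairs.foldl (fun d p => d.insert p (d.getD p 0 + 1)) PySem.Dict.empty
  let result : PySem.Dict String (PySem.Dict String Int) :=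
    counts.items.foldl (fun r pn =>
      let r1 := if r.contains pn.1.1 then r else r.insert pn.1.1 PySem.Dict.empty
      r1.insert pn.1.1 ((r1.getD pn.1.1 PySem.Dict.empty).insert pn.1.2 pn.2)) PySem.Dict.empty
  result.items.map (fun p => (p.1, p.2.items))

-- ===== PRECONDITION & SPEC =====
def Spec_create_frequency_table (data : List (List (String × String))) (key1 : String) (key2 : String) (out : List (String × List (String × Int))) : Prop := out = create_frequency_table_alt data key1 key2
instance (data : List (List (String × String))) (key1 : String) (key2 : String) (out : List (String × List (String × Int))) : Decidable (Spec_create_frequency_table data key1 key2 out) := by unfold Spec_create_frequency_table; infer_instance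

-- ===== CLAIM (what is proved, stated in full; the proofs are below) =====
def Claim_equal_create_frequency_table : Prop := ∀ (data : List (List (String × String))) (key1 : String) (key2 : String), Dom_create_frequency_table data key1 key2 → Spec_create_frequency_table data key1 key2 (create_frequency_table data key1 key2)

-- ===== LEMMAS AND PROOFS =====

-- the truthy pair a row contributes, if any
def pvSel (key1 key2 : String) (cat : List (String × String)) : Option (String × String) :=
  match (PySem.Dict.mk cat).get? key1, (PySem.Dict.mk cat).get? key2 with
  | some v1, some v2 => if v1 ≠ "" ∧ v2 ≠ "" then some (v1, v2) else none
  | _, _ => none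

-- A's loop body, reduced to one insert
def pvStepA (ft : PySem.Dict String (PySem.Dict String Int)) (p : String × String) : PySem.Dict String (PySem.Dict String Int) :=
  ft.insert p.1 ((ft.getD p.1 PySem.Dict.empty).insert p.2 ((ft.getD p.1 PySem.Dict.empty).getD p.2 0 + 1))

-- B's reshape body, reduced to one insert
def pvStepB (r : PySem.Dict String (PySem.Dict String Int)) (pn : (String × String) × Int) : PySem.Dict String (PySem.Dict String Int) :=
  r.insert pn.1.1 ((r.getD pn.1.1 PySem.Dict.empty).insert pn.1.2 pn.2)

theorem pv_stepA_lit (ft : PySem.Dict String (PySem.Dict String Int)) (a b : String) :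
    (let ft1 := if ft.contains a then ft else ft.insert a PySem.Dict.empty
     let inner := ft1.getD a PySem.Dict.empty
     let inner1 := if inner.contains b then inner else inner.insert b (0 : Int)
     ft1.insert a (inner1.insert b (inner1.getD b 0 + 1))) = pvStepA ft (a, b) := by
  simp only [pvStepA]
  by_cases ha : ft.contains a = true
  · simp only [ha, if_true]
    by_cases hb : (ft.getD a PySem.Dict.empty).contains b = true
    · simp [hb]
    · have hb' : (ft.getD a PySem.Dict.empty).contains b = false := by simpa using hb
      simp [hb', PySem.Dict.getD_insert_self, PySem.Dict.insert_insert_self,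
            PySem.Dict.getD_of_not_contains _ _ hb']
  · have ha' : ft.contains a = false := by simpa using ha
    simp [ha', PySem.Dict.getD_insert_self, PySem.Dict.insert_insert_self,
          PySem.Dict.getD_of_not_contains _ _ ha', PySem.Dict.getD_empty, PySem.Dict.contains_empty]

theorem pv_stepB_lit (r : PySem.Dict String (PySem.Dict String Int)) (pn : (String × String) × Int) :
    (let r1 := if r.contains pn.1.1 then r else r.insert pn.1.1 PySem.Dict.empty
     r1.insert pn.1.1 ((r1.getD pn.1.1 PySem.Dict.empty).insert pn.1.2 pn.2)) = pvStepB r pn := by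
  simp only [pvStepB]
  by_cases ha : r.contains pn.1.1 = true
  · simp [ha]
  · have ha' : r.contains pn.1.1 = false := by simpa using ha
    simp [ha', PySem.Dict.getD_insert_self, PySem.Dict.insert_insert_self,
          PySem.Dict.getD_of_not_contains _ _ ha']

theorem pv_pres (a b : String) :
    ∀ (l : List ((String × String) × Int)) (r : PySem.Dict String (PySem.Dict String Int)),
      (∀ q ∈ l, q.1 ≠ (a, b)) →
      ((l.foldl pvStepB r).getD a PySem.Dict.empty).get? b = ((r.getD a PySem.Dict.empty)).get? b := by
  intro l
  induction l with
  | nil => intro r _; rfl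
  | cons q t ih =>
    intro r h
    have hq : q.1 ≠ (a, b) := h q (by simp)
    have ht : ∀ q' ∈ t, q'.1 ≠ (a, b) := fun q' hq' => h q' (by simp [hq'])
    rw [List.foldl_cons, ih _ ht]
    simp only [pvStepB]
    by_cases h1 : q.1.1 = a
    · have h2 : q.1.2 ≠ b := by
        intro h2; exact hq (by rw [← h1, ← h2])
      rw [h1, PySem.Dict.getD_insert_self, PySem.Dict.get?_insert_of_ne _ _ (Ne.symm h2)]
    · rw [PySem.Dict.getD_insert_of_ne _ _ _ (Ne.symm h1)]

theorem pv_val (a b : String) (n : Int) :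
    ∀ (l : List ((String × String) × Int)) (r : PySem.Dict String (PySem.Dict String Int)),
      ((a, b), n) ∈ l → (l.map (·.1)).Nodup →
      ((l.foldl pvStepB r).getD a PySem.Dict.empty).getD b 0 = n := by
  intro l
  induction l with
  | nil => intro r h; simp at h
  | cons q t ih =>
    intro r hmem hnd
    rw [List.map_cons, List.nodup_cons] at hnd
    rcases List.mem_cons.mp hmem with hq | ht
    · -- the head is the (a,b) entry; no later entry touches the (a,b) slot
      have hkeys : ∀ q' ∈ t, q'.1 ≠ (a, b) := by
        intro q' hq' he
        apply hnd.1
        rw [← hq]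
        exact List.mem_map.mpr ⟨q', hq', by rw [he]⟩
      have h1 : ((t.foldl pvStepB (pvStepB r q)).getD a PySem.Dict.empty).get? b = some n := by
        rw [pv_pres a b t _ hkeys, ← hq]
        simp [pvStepB, PySem.Dict.getD_insert_self, PySem.Dict.get?_insert_self]
      rw [List.foldl_cons]
      exact PySem.Dict.getD_of_get?_eq_some _ _ h1
    · rw [List.foldl_cons]
      exact ih _ ht hnd.2

theorem pv_swap {κ ν : Type} [BEq κ] [LawfulBEq κ] (d : PySem.Dict κ ν) (k k' : κ) (v v' : ν)
    (hk : d.contains k = true) (hne : k' ≠ k) :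
    (d.insert k v).insert k' v' = (d.insert k' v').insert k v := by
  have hk2 : (d.insert k' v').contains k = true := by
    rw [PySem.Dict.contains_insert]; simp [hk]
  by_cases hk' : d.contains k' = true
  · have hk'2 : (d.insert k v).contains k' = true := by
      rw [PySem.Dict.contains_insert]; simp [hk']
    apply PySem.Dict.ext
    rw [PySem.Dict.items_insert_of_contains _ _ hk'2, PySem.Dict.items_insert_of_contains _ _ hk,
        PySem.Dict.items_insert_of_contains _ _ hk2, PySem.Dict.items_insert_of_contains _ _ hk']
    simp only [List.map_map]
    apply List.map_congr_left
    intro p _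
    by_cases h1 : p.1 = k <;> by_cases h2 : p.1 = k' <;>
      simp_all [Function.comp, Ne.symm hne]
  · have hk'1 : d.contains k' = false := by simpa using hk'
    have hk'2 : (d.insert k v).contains k' = false := by
      rw [PySem.Dict.contains_insert]; simp [hk'1, fun h : k' = k => hne h]
    apply PySem.Dict.ext
    rw [PySem.Dict.items_insert_of_not_contains _ _ hk'2,
        PySem.Dict.items_insert_of_contains _ _ hk,
        PySem.Dict.items_insert_of_contains _ _ hk2,
        PySem.Dict.items_insert_of_not_contains _ _ hk'1]
    rw [List.map_append]
    simp only [List.map_cons, List.map_nil]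
    have : (((k', v').1 == k) = true) = False := by simp [hne]
    simp [this]

theorem pv_comm (a b : String) (w : Int) :
    ∀ (t : List ((String × String) × Int)) (r : PySem.Dict String (PySem.Dict String Int)),
      (∀ q ∈ t, q.1 ≠ (a, b)) → r.contains a = true → (r.getD a PySem.Dict.empty).contains b = true →
      t.foldl pvStepB (r.insert a ((r.getD a PySem.Dict.empty).insert b w)) =
        (t.foldl pvStepB r).insert a (((t.foldl pvStepB r).getD a PySem.Dict.empty).insert b w) := by
  intro t
  induction t with
  | nil => intro r _ _ _; rfl
  | cons q t ih =>
    intro r h hca hcb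
    have hq : q.1 ≠ (a, b) := h q (by simp)
    have ht : ∀ q' ∈ t, q'.1 ≠ (a, b) := fun q' hq' => h q' (by simp [hq'])
    rw [List.foldl_cons, List.foldl_cons]
    have hca' : (pvStepB r q).contains a = true := by
      simp [pvStepB, PySem.Dict.contains_insert, hca]
    have hcb' : ((pvStepB r q).getD a PySem.Dict.empty).contains b = true := by
      by_cases h1 : q.1.1 = a
      · simp only [pvStepB, h1, PySem.Dict.getD_insert_self, PySem.Dict.contains_insert]
        simp [hcb]
      · simp only [pvStepB]
        rw [PySem.Dict.getD_insert_of_ne _ _ _ (Ne.symm h1)]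
        exact hcb
    have hstep : pvStepB (r.insert a ((r.getD a PySem.Dict.empty).insert b w)) q =
        (pvStepB r q).insert a (((pvStepB r q).getD a PySem.Dict.empty).insert b w) := by
      by_cases h1 : q.1.1 = a
      · have h2 : q.1.2 ≠ b := fun h2 => hq (by rw [← h1, ← h2])
        simp only [pvStepB, h1, PySem.Dict.getD_insert_self, PySem.Dict.insert_insert_self]
        rw [pv_swap _ b q.1.2 w q.2 hcb h2]
      · simp only [pvStepB]
        rw [PySem.Dict.getD_insert_of_ne (k := a) (k' := q.1.1) _ _ _ (fun h' => h1 h')]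
        try rw [PySem.Dict.getD_insert_of_ne (k := q.1.1) (k' := a) _ _ _ (Ne.symm h1)]
        exact pv_swap r a q.1.1 _ _ hca (fun h' => h1 h')
    rw [hstep]
    exact ih _ ht hca' hcb'

theorem pv_upd (a b : String) (n : Int) :
    ∀ (l : List ((String × String) × Int)) (r : PySem.Dict String (PySem.Dict String Int)),
      ((a, b), n) ∈ l → (l.map (·.1)).Nodup →
      (l.map (fun q => if q.1 == (a, b) then ((a, b), n + 1) else q)).foldl pvStepB r =
        (l.foldl pvStepB r).insert a (((l.foldl pvStepB r).getD a PySem.Dict.empty).insert b (n + 1)) := by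
  intro l
  induction l with
  | nil => intro r h; simp at h
  | cons q t ih =>
    intro r hmem hnd
    rw [List.map_cons, List.nodup_cons] at hnd
    rcases List.mem_cons.mp hmem with hq | ht
    · have hkeys : ∀ q' ∈ t, q'.1 ≠ (a, b) := by
        intro q' hq' he
        apply hnd.1
        rw [← hq]
        exact List.mem_map.mpr ⟨q', hq', by rw [he]⟩
      have hmapt : t.map (fun q => if q.1 == (a, b) then ((a, b), n + 1) else q) = t := by
        have := List.map_congr_left (l := t)
          (f := fun q => if q.1 == (a, b) then ((a, b), n + 1) else q) (g := id)
          (fun q' hq' => by simp [hkeys q' hq'])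
        rw [this, List.map_id]
      have hhead : (if q.1 == (a, b) then ((a, b), n + 1) else q) = ((a, b), n + 1) := by
        rw [← hq]; simp
      rw [List.map_cons, hhead, hmapt, List.foldl_cons, List.foldl_cons, ← hq]
      have r0eq : pvStepB r ((a, b), n + 1) =
          (pvStepB r ((a, b), n)).insert a
            (((pvStepB r ((a, b), n)).getD a PySem.Dict.empty).insert b (n + 1)) := by
        simp [pvStepB, PySem.Dict.getD_insert_self, PySem.Dict.insert_insert_self]
      rw [r0eq]
      exact pv_comm a b (n + 1) t _ hkeys
        (by simp [pvStepB])
        (by simp [pvStepB, PySem.Dict.getD_insert_self])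
    · have hq : q.1 ≠ (a, b) := by
        intro he
        exact hnd.1 (he ▸ List.mem_map.mpr ⟨((a, b), n), ht, rfl⟩)
      rw [List.map_cons, List.foldl_cons, List.foldl_cons]
      have : (if q.1 == (a, b) then ((a, b), n + 1) else q) = q := by simp [hq]
      rw [this]
      exact ih _ ht hnd.2

theorem pv_key (ps : List (String × String)) :
    (PySem.Dict.counter ps).items.foldl pvStepB PySem.Dict.empty = ps.foldl pvStepA PySem.Dict.empty := by
  induction ps using List.reverseRecOn with
  | nil => rfl
  | append_singleton ps p ih =>
    obtain ⟨a, b⟩ := p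
    have hnd : ((PySem.Dict.counter ps).items.map (·.1)).Nodup := by
      have := PySem.Dict.nodup_keys_counter (κ := String × String) ps
      simpa [PySem.Dict.keys] using this
    rw [PySem.Dict.counter_append_singleton, List.foldl_append, List.foldl_cons, List.foldl_nil]
    simp only [PySem.Dict.modify]
    by_cases hmem : (a, b) ∈ ps
    · have hcon : (PySem.Dict.counter ps).contains (a, b) = true := by
        rw [PySem.Dict.contains_counter]; simpa using hmem
      have hgetD : (PySem.Dict.counter ps).getD (a, b) 0 = (ps.count (a, b) : Int) :=
        PySem.Dict.getD_counter ps (a, b)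
      have hget : (PySem.Dict.counter ps).get? (a, b) = some ((ps.count (a, b) : Int)) := by
        cases hv : (PySem.Dict.counter ps).get? (a, b) with
        | none =>
          have hc := PySem.Dict.contains_eq_isSome_get? (PySem.Dict.counter ps) (a, b)
          rw [hv, hcon] at hc
          exact absurd hc (by simp)
        | some v =>
          rw [PySem.Dict.getD_of_get?_eq_some _ _ hv] at hgetD
          rw [hgetD]
      have hmemitems : (((a, b), (ps.count (a, b) : Int))) ∈ (PySem.Dict.counter ps).items := by
        refine (PySem.Dict.get?_eq_some_iff_mem_items _ _ _ ?_).mp hget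
        have := PySem.Dict.nodup_keys_counter (κ := String × String) ps
        exact this
      rw [PySem.Dict.items_insert_of_contains _ _ hcon, hgetD]
      rw [pv_upd a b (ps.count (a, b) : Int) _ _ hmemitems hnd, ih]
      have hval : (((ps.foldl pvStepA PySem.Dict.empty)).getD a PySem.Dict.empty).getD b 0
          = (ps.count (a, b) : Int) := by
        rw [← ih]
        exact pv_val a b _ _ _ hmemitems hnd
      simp only [pvStepA, hval]
    · have hcon : (PySem.Dict.counter ps).contains (a, b) = false := by
        rw [PySem.Dict.contains_counter]; simpa using hmem
      have hgetD : (PySem.Dict.counter ps).getD (a, b) 0 = 0 := by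
        rw [PySem.Dict.getD_counter, List.count_eq_zero.mpr hmem]; rfl
      have hkeys : ∀ q ∈ (PySem.Dict.counter ps).items, q.1 ≠ (a, b) := by
        intro q hq he
        have : (PySem.Dict.counter ps).contains (a, b) = true := by
          rw [PySem.Dict.contains_iff_mem_keys]
          simpa [PySem.Dict.keys] using List.mem_map.mpr ⟨q, hq, he⟩
        rw [hcon] at this; exact Bool.noConfusion this
      rw [PySem.Dict.items_insert_of_not_contains _ _ hcon, hgetD, List.foldl_append,
          List.foldl_cons, List.foldl_nil, ih]
      have hpres : (((ps.foldl pvStepA PySem.Dict.empty)).getD a PySem.Dict.empty).getD b 0 = 0 := by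
        rw [← ih, PySem.Dict.getD_eq_get?_getD, pv_pres a b _ _ hkeys]
        rfl
      simp only [pvStepB, pvStepA, hpres]

theorem pv_foldA (key1 key2 : String) :
    ∀ (data : List (List (String × String))) (ft : PySem.Dict String (PySem.Dict String Int)),
      data.foldl (fun ft cat =>
        match (PySem.Dict.mk cat).get? key1, (PySem.Dict.mk cat).get? key2 with
        | some v1, some v2 =>
          if v1 ≠ "" ∧ v2 ≠ "" then
            let ft1 := if ft.contains v1 then ft else ft.insert v1 PySem.Dict.empty
            let inner := ft1.getD v1 PySem.Dict.empty
            let inner1 := if inner.contains v2 then inner else inner.insert v2 (0 : Int)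
            ft1.insert v1 (inner1.insert v2 (inner1.getD v2 0 + 1))
          else ft
        | _, _ => ft) ft = (data.filterMap (pvSel key1 key2)).foldl pvStepA ft := by
  intro data
  induction data with
  | nil => intro ft; rfl
  | cons cat t ih =>
    intro ft
    rw [List.foldl_cons, List.filterMap_cons]
    cases h1 : (PySem.Dict.mk cat).get? key1 with
    | none => simp only [pvSel, h1]; exact ih ft
    | some v1 =>
      cases h2 : (PySem.Dict.mk cat).get? key2 with
      | none => simp only [pvSel, h1, h2]; exact ih ft
      | some v2 =>
        simp only [pvSel, h1, h2]
        by_cases hc : v1 ≠ "" ∧ v2 ≠ ""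
        · rw [if_pos hc, if_pos hc, List.foldl_cons, pv_stepA_lit ft v1 v2]
          exact ih _
        · rw [if_neg hc, if_neg hc]
          exact ih ft

theorem pv_foldPairs (key1 key2 : String) :
    ∀ (data : List (List (String × String))) (ps : List (String × String)),
      data.foldl (fun ps cat =>
        match (PySem.Dict.mk cat).get? key1 with
        | none => ps
        | some v1 =>
          match (PySem.Dict.mk cat).get? key2 with
          | none => ps
          | some v2 => if v1 ≠ "" ∧ v2 ≠ "" then ps ++ [(v1, v2)] else ps) ps = ps ++ data.filterMap (pvSel key1 key2) := by
  intro data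
  induction data with
  | nil => intro ps; simp
  | cons cat t ih =>
    intro ps
    rw [List.foldl_cons, List.filterMap_cons]
    cases h1 : (PySem.Dict.mk cat).get? key1 with
    | none => simp only [pvSel, h1]; exact ih ps
    | some v1 =>
      cases h2 : (PySem.Dict.mk cat).get? key2 with
      | none => simp only [pvSel, h1, h2]; exact ih ps
      | some v2 =>
        simp only [pvSel, h1, h2]
        by_cases hc : v1 ≠ "" ∧ v2 ≠ ""
        · rw [if_pos hc, if_pos hc, ih (ps ++ [(v1, v2)]), List.append_assoc]
          rfl
        · rw [if_neg hc, if_neg hc]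
          exact ih ps

-- ===== VERDICT (by name: the statement is the Claim_ definition above) =====
theorem create_frequency_table_spec : Claim_equal_create_frequency_table := by
  intro data key1 key2 _
  unfold Spec_create_frequency_table create_frequency_table create_frequency_table_alt
  rw [pv_foldA key1 key2 data PySem.Dict.empty]
  rw [pv_foldPairs key1 key2 data [], List.nil_append]
  show ((data.filterMap (pvSel key1 key2)).foldl pvStepA PySem.Dict.empty).items.map
        (fun p => (p.1, p.2.items))
      = (((data.filterMap (pvSel key1 key2)).foldl
            (fun d p => d.insert p (d.getD p 0 + 1)) PySem.Dict.empty).items.foldl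
          (fun r pn =>
            (if r.contains pn.1.1 then r else r.insert pn.1.1 PySem.Dict.empty).insert pn.1.1
              (((if r.contains pn.1.1 then r else r.insert pn.1.1 PySem.Dict.empty).getD pn.1.1
                  PySem.Dict.empty).insert pn.1.2 pn.2))
          PySem.Dict.empty).items.map (fun p => (p.1, p.2.items))
  have hB : (fun (r : PySem.Dict String (PySem.Dict String Int)) (pn : (String × String) × Int) =>
        (if r.contains pn.1.1 then r else r.insert pn.1.1 PySem.Dict.empty).insert pn.1.1
          (((if r.contains pn.1.1 then r else r.insert pn.1.1 PySem.Dict.empty).getD pn.1.1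
              PySem.Dict.empty).insert pn.1.2 pn.2)) = pvStepB := by
    funext r pn
    exact pv_stepB_lit r pn
  rw [PySem.Dict.foldl_insert_getD_add_one_eq_counter, hB, pv_key]
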